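-- pv_equiv track=rewrite | github.com/linkenpeng/python | src/algorithms/recursion.py | getrulerseg
-- ===== SOURCE A (Python) =====
-- def getrulerseg(seq, length):
--     if (length == 2):
--         return [1]
--     else:
--         seq.extend(getrulerseg([], length-1))
--         seq.append(length-1)
--         seq.extend(getrulerseg([], length-1))
--     return seq
-- ===== SOURCE B (Python) =====
-- def getrulerseg(seq, length):
--     r = [1]
--     for k in range(2, length):
--         r = r + [k] + r
--     seq.extend(r)
--     return seq
-- ===== Notes on version B (the rewrite author's own statement) =====
-- stated objective: simpler
-- what changed: Replaced the doubly-branching recursion with a single bottom-up loop that builds the ruler sequence once by self-concatenation r = r + [k] + r.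
-- intended difference: On inputs with length == 2 and a nonempty seq, A returns [1] (its base case discards seq, unlike every other case which extends it), while B returns seq + [1]; extending seq uniformly is the intended behaviour. — e.g. on getrulerseg([5], 2): A returns [1], B returns [5, 1]
import Mathlib
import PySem

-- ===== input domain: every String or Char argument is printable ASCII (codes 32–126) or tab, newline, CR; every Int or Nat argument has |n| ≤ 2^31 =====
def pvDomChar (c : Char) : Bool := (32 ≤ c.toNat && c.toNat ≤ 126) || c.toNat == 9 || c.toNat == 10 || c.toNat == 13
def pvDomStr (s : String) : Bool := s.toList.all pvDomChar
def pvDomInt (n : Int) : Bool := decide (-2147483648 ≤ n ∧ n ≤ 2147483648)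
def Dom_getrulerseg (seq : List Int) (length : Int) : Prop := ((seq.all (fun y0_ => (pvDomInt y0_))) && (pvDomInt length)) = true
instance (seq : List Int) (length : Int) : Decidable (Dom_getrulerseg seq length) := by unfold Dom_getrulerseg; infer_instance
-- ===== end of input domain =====

-- B replaces the doubly-branching recursion by one bottom-up self-concatenation loop
-- (objective: simpler); equivalence is about the RETURN value only (A and B both
-- mutate `seq` in Python, except A's length==2 base case which does not).

-- ===== PORT A =====
-- A's recursion on an Int argument; fuel makes the same computation total
-- ((length-1).toNat is enough fuel for every length ≥ 2; outside Pre_ nothing is claimed).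
def getrulersegFuel (fuel : Nat) (seq : List Int) (length : Int) : List Int :=
  match fuel with
  | 0 => []
  | fuel + 1 =>
    if length = 2 then [1]
    else
      seq ++ getrulersegFuel fuel [] (length - 1) ++ [length - 1]
          ++ getrulersegFuel fuel [] (length - 1)

def getrulerseg (seq : List Int) (length : Int) : List Int :=
  getrulersegFuel (length - 1).toNat seq length

-- ===== PORT B =====
def getrulerseg_alt (seq : List Int) (length : Int) : List Int :=
  let r := (PySem.List.pyRange 2 length 1).foldl (fun r k => r ++ [k] ++ r) [1]
  seq ++ r

-- ===== PRECONDITION & SPEC =====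
-- A recurses forever (RecursionError) for length < 2; those inputs are excluded.
def Pre_getrulerseg (_seq : List Int) (length : Int) : Prop := 2 ≤ length
instance (seq : List Int) (length : Int) : Decidable (Pre_getrulerseg seq length) := by
  unfold Pre_getrulerseg; infer_instance

def pvWitness_getrulerseg : List Int × Int := ([4, 7], 4)

-- On inputs with length == 2 and nonempty seq, A returns [1] (its base case discards seq,
-- unlike every other case which extends it), while B returns seq ++ [1]; extending seq
-- uniformly is the intended behaviour.
def D_getrulerseg (seq : List Int) (length : Int) : Prop := length = 2 ∧ seq ≠ []
instance (seq : List Int) (length : Int) : Decidable (D_getrulerseg seq length) := by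
  unfold D_getrulerseg; infer_instance

def Spec_getrulerseg (seq : List Int) (length : Int) (out : List Int) : Prop :=
  ¬ D_getrulerseg seq length → out = getrulerseg_alt seq length
instance (seq : List Int) (length : Int) (out : List Int) : Decidable (Spec_getrulerseg seq length out) := by
  unfold Spec_getrulerseg; infer_instance

def pvDiffWitness_getrulerseg : List Int × Int := ([5], 2)
def pvDiffWitnessOut_getrulerseg : (List Int) × (List Int) := ([1], [5, 1])

-- ===== CLAIM =====
def Claim_unchanged_getrulerseg : Prop := ∀ (seq : List Int) (length : Int), Dom_getrulerseg seq length → Pre_getrulerseg seq length → Spec_getrulerseg seq length (getrulerseg seq length)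
def Claim_changed_getrulerseg : Prop := Dom_getrulerseg (pvDiffWitness_getrulerseg.1) (pvDiffWitness_getrulerseg.2) ∧ Pre_getrulerseg (pvDiffWitness_getrulerseg.1) (pvDiffWitness_getrulerseg.2) ∧ D_getrulerseg (pvDiffWitness_getrulerseg.1) (pvDiffWitness_getrulerseg.2) ∧ getrulerseg (pvDiffWitness_getrulerseg.1) (pvDiffWitness_getrulerseg.2) = pvDiffWitnessOut_getrulerseg.1 ∧ getrulerseg_alt (pvDiffWitness_getrulerseg.1) (pvDiffWitness_getrulerseg.2) = pvDiffWitnessOut_getrulerseg.2 ∧ pvDiffWitnessOut_getrulerseg.1 ≠ pvDiffWitnessOut_getrulerseg.2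
def Claim_exact_getrulerseg : Prop := ∀ (seq : List Int) (length : Int), Dom_getrulerseg seq length → Pre_getrulerseg seq length → D_getrulerseg seq length → getrulerseg seq length ≠ getrulerseg_alt seq length

-- ===== LEMMAS AND PROOFS =====

-- B's loop result, as a closed function of length.
def rulerB (length : Int) : List Int :=
  (PySem.List.pyRange 2 length 1).foldl (fun r k => r ++ [k] ++ r) [1]

theorem rulerB_two : rulerB 2 = [1] := by decide

theorem rulerB_step (n : Int) (h : 3 ≤ n) :
    rulerB n = rulerB (n - 1) ++ [n - 1] ++ rulerB (n - 1) := by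
  obtain ⟨m, rfl⟩ : ∃ m, n = m + 1 := ⟨n - 1, by omega⟩
  unfold rulerB
  simp only [add_sub_cancel_right]
  rw [PySem.List.pyRange_one_succ_right (a := 2) (b := m) (by omega)]
  simp only [List.foldl_append, List.foldl_cons, List.foldl_nil]

-- one-step unfolding of A's recursion
theorem fuel_step (f : Nat) (seq : List Int) (n : Int) :
    getrulersegFuel (f + 1) seq n =
      if n = 2 then [1]
      else seq ++ getrulersegFuel f [] (n - 1) ++ [n - 1] ++ getrulersegFuel f [] (n - 1) :=
  rfl

-- With enough fuel, A's recursive call on the empty seed computes rulerB.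
theorem fuel_eq_rulerB (k : Nat) : ∀ (n : Int), 2 ≤ n → (n - 2).toNat ≤ k →
    getrulersegFuel (k + 1) [] n = rulerB n := by
  induction k with
  | zero =>
    intro n h2 hk
    have hn : n = 2 := by omega
    subst hn
    simp [getrulersegFuel, rulerB_two]
  | succ k ih =>
    intro n h2 hk
    by_cases h : n = 2
    · subst h; simp [getrulersegFuel, rulerB_two]
    · have h3 : 3 ≤ n := by omega
      have hrec := ih (n - 1) (by omega) (by omega)
      rw [fuel_step, if_neg h, hrec, rulerB_step n h3]
      simp

theorem getrulerseg_spec : Claim_unchanged_getrulerseg := by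
  intro seq n _ hpre hnd
  unfold getrulerseg getrulerseg_alt
  show getrulersegFuel (n - 1).toNat seq n = seq ++ rulerB n
  have h2 : 2 ≤ n := hpre
  by_cases h : n = 2
  · subst h
    have hseq : seq = [] := by
      by_contra hne
      exact hnd ⟨rfl, hne⟩
    subst hseq
    simp [getrulersegFuel, rulerB_two]
  · have h3 : 3 ≤ n := by omega
    have hf : (n - 1).toNat = (n - 3).toNat + 1 + 1 := by omega
    rw [hf, fuel_step, if_neg h,
        fuel_eq_rulerB (n - 3).toNat (n - 1) (by omega) (by omega), rulerB_step n h3]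
    simp

theorem getrulerseg_changed : Claim_changed_getrulerseg := by
  unfold Claim_changed_getrulerseg; decide

theorem getrulerseg_tight : Claim_exact_getrulerseg := by
  intro seq n _ _ hd heq
  obtain ⟨hn, hne⟩ := hd
  subst hn
  have hA : getrulerseg seq 2 = [1] := by
    simp [getrulerseg, getrulersegFuel]
  have hB : getrulerseg_alt seq 2 = seq ++ [1] := by
    simp [getrulerseg_alt]
  rw [hA, hB] at heq
  have := congrArg List.length heq
  simp at this
  exact hne this
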